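-- pv_equiv track=rewrite | github.com/ninepig/leecode_dd_2024 | zmianjing/ddlastRound/ddHighChance/resurantName.py | findSimilarRestaunt
-- ===== SOURCE A (Python) =====
-- import collections
--
-- def findSimilarRestaunt(orignal:str,targets:list[str])->list[str]:
--     if not orignal or not targets or len(targets) == 0:
--         return []
--     orignal_counter = collections.Counter(orignal)
--     N = len(orignal)
--     res = []
--     for target in targets:
--         swap_counter = 0
--         target_counter = collections.Counter(target)
--         ## if counter does not match
--         if orignal_counter != target_counter:
--             continue
--         for i in range(N):
--             if orignal[i] != target[i]:
--                 swap_counter += 1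
--             if swap_counter > 2:
--                 break
--         if swap_counter == 0 or swap_counter == 2:
--            res.append(target)
--
--     return res
-- ===== SOURCE B (Python) =====
-- def findSimilarRestaunt(orignal: str, targets: list[str]) -> list[str]:
--     if not orignal or not targets:
--         return []
--     n = len(orignal)
--     res = []
--     for target in targets:
--         if len(target) != n:
--             continue
--         diffs = []
--         for i in range(n):
--             if orignal[i] != target[i]:
--                 diffs.append(i)
--                 if len(diffs) > 2:
--                     break
--         if not diffs:
--             res.append(target)
--         elif len(diffs) == 2:
--             i, j = diffs
--             if orignal[i] == target[j] and orignal[j] == target[i]: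
--                 res.append(target)
--     return res
-- ===== Notes on version B (the rewrite author's own statement) =====
-- stated objective: faster
-- what changed: B drops the Counter construction/comparison entirely: it checks lengths, collects mismatch positions with early exit after 3, and accepts on 0 mismatches or exactly 2 cross-equal (swappable) positions, which is equivalent to the anagram-plus-mismatch-count test.
import Mathlib
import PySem

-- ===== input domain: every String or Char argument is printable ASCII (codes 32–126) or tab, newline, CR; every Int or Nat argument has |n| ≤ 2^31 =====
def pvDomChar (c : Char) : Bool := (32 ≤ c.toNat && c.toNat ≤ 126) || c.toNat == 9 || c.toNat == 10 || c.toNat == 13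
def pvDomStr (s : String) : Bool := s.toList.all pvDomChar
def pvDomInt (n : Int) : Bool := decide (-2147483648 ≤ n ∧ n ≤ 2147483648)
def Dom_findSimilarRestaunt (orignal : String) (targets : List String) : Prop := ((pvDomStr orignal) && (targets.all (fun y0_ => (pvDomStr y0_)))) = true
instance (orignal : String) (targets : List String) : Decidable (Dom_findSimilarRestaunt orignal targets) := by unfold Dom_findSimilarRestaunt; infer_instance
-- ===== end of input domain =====

-- B replaces A's per-target Counter build+compare by a single mismatch-position scan
-- (equivalent because equal-length strings with exactly two mismatches are anagrams iff those two positions swap).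

-- ===== PORT A =====
-- Python dict == on counters: equal key sets and equal values on those keys
-- (exact for Python's dict equality, since the key sets are compared first).
def pyDictEq (d1 d2 : PySem.Dict Char Int) : Bool :=
  d1.keys.all (fun k => d2.keys.contains k) &&
  d2.keys.all (fun k => d1.keys.contains k) &&
  d1.keys.all (fun k => d1.getD k 0 == d2.getD k 0)

-- inner 'for i in range(N)' loop of A counting mismatches, breaking once the counter exceeds 2.
-- Indexing: i < N = len(orignal) always, and target[i] is only reached after the counter
-- equality succeeded (so len(target) = N); getD is exact there.
def aInner (o t : List Char) (N i sc : Nat) : Nat :=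
  if _h : i < N then
    let sc' := if o.getD i ' ' != t.getD i ' ' then sc + 1 else sc
    if sc' > 2 then sc' else aInner o t N (i+1) sc'
  else sc
termination_by N - i

def findSimilarRestaunt (orignal : String) (targets : List String) : List String :=
  let o := orignal.toList
  if o = [] ∨ targets = [] ∨ targets.length = 0 then []
  else
    let oc := PySem.Dict.counter o
    let N := o.length
    targets.foldl (fun res target =>
      let t := target.toList
      let tc := PySem.Dict.counter t
      if pyDictEq oc tc then
        let sc := aInner o t N 0 0
        if sc = 0 ∨ sc = 2 then res ++ [target] else res
      else res) []

-- ===== PORT B =====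
-- inner loop of B: collect mismatch indices, break once more than 2 accumulate.
def bDiffs (o t : List Char) (n i : Nat) (acc : List Nat) : List Nat :=
  if _h : i < n then
    if o.getD i ' ' != t.getD i ' ' then
      let acc' := acc ++ [i]
      if acc'.length > 2 then acc' else bDiffs o t n (i+1) acc'
    else bDiffs o t n (i+1) acc
  else acc
termination_by n - i

def findSimilarRestaunt_alt (orignal : String) (targets : List String) : List String :=
  let o := orignal.toList
  if o = [] ∨ targets = [] then []
  else
    let n := o.length
    targets.foldl (fun res target =>
      let t := target.toList
      if t.length = n then
        match bDiffs o t n 0 [] with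
        | [] => res ++ [target]
        | [i, j] =>
            if o.getD i ' ' = t.getD j ' ' ∧ o.getD j ' ' = t.getD i ' ' then res ++ [target]
            else res
        | _ => res
      else res
    ) []

-- ===== PRECONDITION & SPEC =====
def Spec_findSimilarRestaunt (orignal : String) (targets : List String) (out : List String) : Prop := out = findSimilarRestaunt_alt orignal targets
instance (orignal : String) (targets : List String) (out : List String) : Decidable (Spec_findSimilarRestaunt orignal targets out) := by unfold Spec_findSimilarRestaunt; infer_instance

-- ===== CLAIM (what is proved, stated in full; the proofs are below) =====
def Claim_equal_findSimilarRestaunt : Prop := ∀ (orignal : String) (targets : List String), Dom_findSimilarRestaunt orignal targets → Spec_findSimilarRestaunt orignal targets (findSimilarRestaunt orignal targets)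

-- ===== LEMMAS AND PROOFS =====

-- the mismatch positions among indices [i, n)
def mismFrom (o t : List Char) (i n : Nat) : List Nat :=
  (List.range' i (n - i)).filter (fun k => o.getD k ' ' != t.getD k ' ')

-- A's per-target inclusion condition, B's per-target inclusion condition
def condA (o t : List Char) : Bool :=
  if pyDictEq (PySem.Dict.counter o) (PySem.Dict.counter t) then
    (if aInner o t o.length 0 0 = 0 ∨ aInner o t o.length 0 0 = 2 then true else false)
  else false

def condB (o t : List Char) : Bool :=
  if t.length = o.length then
    (match bDiffs o t o.length 0 [] with
     | [] => true
     | [i, j] => if o.getD i ' ' = t.getD j ' ' ∧ o.getD j ' ' = t.getD i ' ' then true else false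
     | _ => false)
  else false

theorem aInner_eq (o t : List Char) (N : Nat) :
    ∀ m i sc, N - i ≤ m → sc ≤ 2 →
      aInner o t N i sc = min (sc + (mismFrom o t i N).length) 3 := by
  intro m
  induction m with
  | zero =>
      intro i sc hm hsc
      have h : ¬ i < N := by omega
      unfold aInner mismFrom
      rw [dif_neg h]
      have : N - i = 0 := by omega
      simp [this]
      omega
  | succ m ih =>
      intro i sc hm hsc
      by_cases h : i < N
      · unfold aInner
        rw [dif_pos h]
        have hr : N - i = (N - (i+1)) + 1 := by omega
        have hrange : List.range' i (N - i) = i :: List.range' (i+1) (N - (i+1)) := by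
          rw [hr, List.range'_succ]
        by_cases hmis : (o.getD i ' ' != t.getD i ' ') = true
        · simp only [hmis, if_true]
          by_cases hbr : sc + 1 > 2
          · have hsc2 : sc = 2 := by omega
            simp only [hbr, if_true]
            unfold mismFrom
            rw [hrange]; simp only [List.filter_cons]; rw [if_pos hmis]
            simp [hsc2]
            omega
          · simp only [hbr, if_false]
            rw [ih (i+1) (sc+1) (by omega) (by omega)]
            unfold mismFrom
            rw [hrange]; simp only [List.filter_cons]; rw [if_pos hmis]
            simp only [List.length_cons]
            omega
        · have hm' : (o.getD i ' ' != t.getD i ' ') = false := by simpa using hmis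
          simp only [hm', Bool.false_eq_true, if_false]
          have hbr : ¬ sc > 2 := by omega
          rw [if_neg hbr]
          rw [ih (i+1) sc (by omega) hsc]
          unfold mismFrom
          rw [hrange]; simp only [List.filter_cons]; rw [if_neg hmis]
      · unfold aInner mismFrom
        rw [dif_neg h]
        have : N - i = 0 := by omega
        simp [this]
        omega

theorem bDiffs_eq (o t : List Char) (n : Nat) :
    ∀ m i acc, n - i ≤ m → acc.length ≤ 2 →
      bDiffs o t n i acc = (acc ++ mismFrom o t i n).take 3 := by
  intro m
  induction m with
  | zero =>
      intro i acc hm hacc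
      have h : ¬ i < n := by omega
      unfold bDiffs mismFrom
      rw [dif_neg h]
      have : n - i = 0 := by omega
      simp [this]
      omega
  | succ m ih =>
      intro i acc hm hacc
      by_cases h : i < n
      · unfold bDiffs
        rw [dif_pos h]
        have hr : n - i = (n - (i+1)) + 1 := by omega
        have hrange : List.range' i (n - i) = i :: List.range' (i+1) (n - (i+1)) := by
          rw [hr, List.range'_succ]
        by_cases hmis : (o.getD i ' ' != t.getD i ' ') = true
        · simp only [hmis, if_true]
          by_cases hbr : (acc ++ [i]).length > 2
          · have hacc2 : acc.length = 2 := by simp at hbr; omega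
            simp only [hbr, if_true]
            unfold mismFrom
            rw [hrange]; simp only [List.filter_cons]; rw [if_pos hmis]
            have h3 : (acc ++ [i]).length = 3 := by simp [hacc2]
            rw [show acc ++ i :: List.filter (fun k => o.getD k ' ' != t.getD k ' ') (List.range' (i+1) (n - (i+1))) = (acc ++ [i]) ++ List.filter (fun k => o.getD k ' ' != t.getD k ' ') (List.range' (i+1) (n - (i+1))) by simp]
            rw [List.take_append_of_le_length (by omega)]
            rw [List.take_of_length_le (by omega)]
          · simp only [hbr, if_false]
            rw [ih (i+1) (acc ++ [i]) (by omega) (by simp at hbr ⊢; omega)]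
            unfold mismFrom
            rw [hrange]; simp only [List.filter_cons]; rw [if_pos hmis]
            simp
        · have hm' : (o.getD i ' ' != t.getD i ' ') = false := by simpa using hmis
          simp only [hm', Bool.false_eq_true, if_false]
          rw [ih (i+1) acc (by omega) hacc]
          unfold mismFrom
          rw [hrange]; simp only [List.filter_cons]; rw [if_neg hmis]
      · unfold bDiffs mismFrom
        rw [dif_neg h]
        have : n - i = 0 := by omega
        simp [this]
        omega

-- Python dict == on counters says: equal counts everywhere, i.e. the lists are permutations
theorem pyDictEq_counter (o t : List Char) :
    pyDictEq (PySem.Dict.counter o) (PySem.Dict.counter t) = true ↔ o.Perm t := by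
  unfold pyDictEq
  simp only [Bool.and_eq_true, List.all_eq_true, PySem.Dict.keys_counter,
    PySem.Dict.getD_counter, List.contains_eq_mem, decide_eq_true_eq, beq_iff_eq]
  constructor
  · rintro ⟨⟨h1, h2⟩, h3⟩
    rw [List.perm_iff_count]
    intro c
    by_cases hc : c ∈ o
    · have := h3 c (by simpa [PySem.Set.mem_ofList] using hc)
      exact_mod_cast this
    · have hct : c ∉ t := by
        intro hct
        exact hc (by simpa [PySem.Set.mem_ofList] using h2 c (by simpa [PySem.Set.mem_ofList] using hct))
      simp [List.count_eq_zero_of_not_mem, hc, hct]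
  · intro hp
    have hc := List.perm_iff_count.mp hp
    refine ⟨⟨fun k hk => ?_, fun k hk => ?_⟩, fun k hk => ?_⟩
    · simp only [PySem.Set.mem_ofList] at hk ⊢
      have := hc k
      have h0 : 0 < o.count k := List.count_pos_iff.mpr hk
      exact List.count_pos_iff.mp (by omega)
    · simp only [PySem.Set.mem_ofList] at hk ⊢
      have := hc k
      have h0 : 0 < t.count k := List.count_pos_iff.mpr hk
      exact List.count_pos_iff.mp (by omega)
    · exact_mod_cast hc k

-- count decomposition along the zip: matched positions cancel
theorem count_decomp :
    ∀ (o t : List Char), o.length = t.length → ∀ c,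
      o.count c + (((o.zip t).filter (fun p => p.1 != p.2)).map Prod.snd).count c
        = t.count c + (((o.zip t).filter (fun p => p.1 != p.2)).map Prod.fst).count c := by
  intro o
  induction o with
  | nil =>
      intro t ht c
      have : t = [] := List.eq_nil_of_length_eq_zero ht.symm
      simp [this]
  | cons a o ih =>
      intro t ht c
      cases t with
      | nil => simp at ht
      | cons b t' =>
          have ht' : o.length = t'.length := by simpa using ht
          have H := ih t' ht' c
          by_cases hab : (a != b) = true
          · simp only [List.zip_cons_cons, List.filter_cons]
            rw [if_pos (by simpa using hab)]
            simp only [List.map_cons, List.count_cons]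
            split_ifs <;> omega
          · have hab' : a = b := by simpa using hab
            subst hab'
            simp only [List.zip_cons_cons, List.filter_cons]
            simp only [bne_self_eq_false, Bool.false_eq_true, if_false, List.count_cons]
            split_ifs <;> omega

theorem perm_iff_mism (o t : List Char) (h : o.length = t.length) :
    o.Perm t ↔
      (((o.zip t).filter (fun p => p.1 != p.2)).map Prod.fst).Perm
        (((o.zip t).filter (fun p => p.1 != p.2)).map Prod.snd) := by
  rw [List.perm_iff_count, List.perm_iff_count]
  constructor
  · intro hp c
    have := count_decomp o t h c
    have := hp c
    omega
  · intro hp c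
    have := count_decomp o t h c
    have := hp c
    omega

-- the zip mismatches are the indexed mismatches
theorem mism_as_idx (o t : List Char) (h : t.length = o.length) :
    (o.zip t).filter (fun p => p.1 != p.2)
      = (mismFrom o t 0 o.length).map (fun k => (o.getD k ' ', t.getD k ' ')) := by
  have hz : o.zip t = (List.range o.length).map (fun k => (o.getD k ' ', t.getD k ' ')) := by
    apply List.ext_getElem
    · simp [h]
    · intro k h1 h2
      have hk : k < o.length := by simpa using h2
      have hkt : k < t.length := by omega
      simp [List.getElem_zip, hk, hkt]
  rw [hz, List.filter_map]
  unfold mismFrom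
  simp [List.range_eq_range', Function.comp_def]

-- per-target inclusion conditions agree
theorem cond_eq (o t : List Char) : condA o t = condB o t := by
  have hA := aInner_eq o t o.length (o.length) 0 0 (by omega) (by omega)
  have hB := bDiffs_eq o t o.length (o.length) 0 [] (by omega) (by simp)
  simp only [List.nil_append] at hB
  unfold condA condB
  rw [hA, hB]
  by_cases hlen : t.length = o.length
  · have hperm := pyDictEq_counter o t
    have hmm := perm_iff_mism o t hlen.symm
    rw [mism_as_idx o t hlen] at hmm
    rcases hF : mismFrom o t 0 o.length with _ | ⟨i, _ | ⟨j, _ | ⟨k, rest⟩⟩⟩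
    · -- no mismatch: both accept iff anagram; here o = t
      rw [hF] at hmm
      simp only [List.length_nil, List.take_nil]
      have : o.Perm t := hmm.mpr (List.Perm.refl _)
      simp [hperm.mpr this, hlen]
    · -- one mismatch: both reject
      simp
    · -- two mismatches: anagram iff the two positions swap
      rw [hF] at hmm
      have hi : i ∈ mismFrom o t 0 o.length := by rw [hF]; simp
      have hj : j ∈ mismFrom o t 0 o.length := by rw [hF]; simp
      unfold mismFrom at hi hj
      simp only [List.mem_filter, bne_iff_ne, ne_eq] at hi hj
      have hab : o.getD i ' ' ≠ t.getD i ' ' := by simpa using hi.2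
      have hcd : o.getD j ' ' ≠ t.getD j ' ' := by simpa using hj.2
      have key : o.Perm t ↔ (o.getD i ' ' = t.getD j ' ' ∧ o.getD j ' ' = t.getD i ' ') := by
        rw [hmm]
        constructor
        · intro hp
          set a := o.getD i ' '; set b := t.getD i ' '
          set c := o.getD j ' '; set d := t.getD j ' '
          simp only [List.map_cons, List.map_nil] at hp
          have had : a = d := by
            have ha : a ∈ [b, d] := hp.subset (List.Mem.head _)
            simp only [List.mem_cons, List.not_mem_nil, or_false] at ha
            rcases ha with h' | h'
            · exact absurd h' hab
            · exact h'
          have hcb : c = b := by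
            have hb : b ∈ [a, c] := hp.symm.subset (List.Mem.head _)
            simp only [List.mem_cons, List.not_mem_nil, or_false] at hb
            rcases hb with h' | h'
            · exact absurd h'.symm hab
            · exact h'.symm
          exact ⟨had, hcb⟩
        · rintro ⟨h1, h2⟩
          simp only [List.map_cons, List.map_nil, h1, h2]
          exact List.Perm.swap _ _ _
      by_cases hs : (o.getD i ' ' = t.getD j ' ' ∧ o.getD j ' ' = t.getD i ' ')
      · simp [hperm.mpr (key.mpr hs), hlen]
        exact ⟨hs.1, hs.2⟩
      · have hnp : ¬ o.Perm t := fun hp => hs (key.mp hp)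
        have hf : pyDictEq (PySem.Dict.counter o) (PySem.Dict.counter t) = false :=
          Bool.eq_false_iff.mpr (fun h' => hnp (hperm.mp h'))
        simp [hf, hlen]
        intro h1 h2
        exact hs ⟨h1, h2⟩
    · -- three or more mismatches: both reject
      simp
  · -- different lengths: not an anagram, B's length guard fails
    have hf : pyDictEq (PySem.Dict.counter o) (PySem.Dict.counter t) = false :=
      Bool.eq_false_iff.mpr (fun h' =>
        hlen (((pyDictEq_counter o t).mp h').length_eq).symm)
    simp [hf, hlen]

-- the two fold bodies agree target by target
theorem body_eq (o : List Char) (res : List String) (target : String) :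
    (if pyDictEq (PySem.Dict.counter o) (PySem.Dict.counter target.toList) then
        (if aInner o target.toList o.length 0 0 = 0 ∨ aInner o target.toList o.length 0 0 = 2 then
          res ++ [target] else res)
      else res)
    = (if target.toList.length = o.length then
         (match bDiffs o target.toList o.length 0 [] with
          | [] => res ++ [target]
          | [i, j] =>
              if o.getD i ' ' = target.toList.getD j ' ' ∧ o.getD j ' ' = target.toList.getD i ' ' then
                res ++ [target]
              else res
          | _ => res)
       else res) := by
  have hc := cond_eq o target.toList
  unfold condA condB at hc
  by_cases h1 : pyDictEq (PySem.Dict.counter o) (PySem.Dict.counter target.toList) = true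
  · rw [if_pos h1] at hc ⊢
    by_cases h2 : aInner o target.toList o.length 0 0 = 0 ∨ aInner o target.toList o.length 0 0 = 2
    · rw [if_pos h2] at hc ⊢
      by_cases h3 : target.toList.length = o.length
      · rw [if_pos h3] at hc ⊢
        rcases hd : bDiffs o target.toList o.length 0 [] with _ | ⟨i, _ | ⟨j, _ | ⟨k, rest⟩⟩⟩ <;> simp only [hd] at hc
        · rfl
        · simp at hc
        · dsimp only at hc ⊢
          by_cases hs : (o.getD i ' ' = target.toList.getD j ' ' ∧ o.getD j ' ' = target.toList.getD i ' ')
          · rw [if_pos hs]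
          · rw [if_neg hs] at hc; simp at hc
        · simp at hc
      · rw [if_neg h3] at hc; simp at hc
    · rw [if_neg h2] at hc ⊢
      by_cases h3 : target.toList.length = o.length
      · rw [if_pos h3] at hc ⊢
        rcases hd : bDiffs o target.toList o.length 0 [] with _ | ⟨i, _ | ⟨j, _ | ⟨k, rest⟩⟩⟩ <;> simp only [hd] at hc
        · simp at hc
        · rfl
        · dsimp only at hc ⊢
          by_cases hs : (o.getD i ' ' = target.toList.getD j ' ' ∧ o.getD j ' ' = target.toList.getD i ' ')
          · rw [if_pos hs] at hc; simp at hc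
          · rw [if_neg hs]
        · rfl
      · rw [if_neg h3]
  · rw [if_neg h1] at hc ⊢
    by_cases h3 : target.toList.length = o.length
    · rw [if_pos h3] at hc ⊢
      rcases hd : bDiffs o target.toList o.length 0 [] with _ | ⟨i, _ | ⟨j, _ | ⟨k, rest⟩⟩⟩ <;> simp only [hd] at hc
      · simp at hc
      · rfl
      · dsimp only at hc ⊢
        by_cases hs : (o.getD i ' ' = target.toList.getD j ' ' ∧ o.getD j ' ' = target.toList.getD i ' ')
        · rw [if_pos hs] at hc; simp at hc
        · rw [if_neg hs]
      · rfl
    · rw [if_neg h3]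

theorem fold_eq (o : List Char) (ts : List String) :
    ∀ res : List String,
      ts.foldl (fun res target =>
        let t := target.toList
        let tc := PySem.Dict.counter t
        if pyDictEq (PySem.Dict.counter o) tc then
          let sc := aInner o t o.length 0 0
          if sc = 0 ∨ sc = 2 then res ++ [target] else res
        else res) res
      = ts.foldl (fun res target =>
          let t := target.toList
          if t.length = o.length then
            match bDiffs o t o.length 0 [] with
            | [] => res ++ [target]
            | [i, j] =>
                if o.getD i ' ' = t.getD j ' ' ∧ o.getD j ' ' = t.getD i ' ' then res ++ [target]
                else res
            | _ => res
          else res) res := by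
  intro res
  have hfun : (fun (res : List String) (target : String) =>
        let t := target.toList
        let tc := PySem.Dict.counter t
        if pyDictEq (PySem.Dict.counter o) tc then
          let sc := aInner o t o.length 0 0
          if sc = 0 ∨ sc = 2 then res ++ [target] else res
        else res)
      = (fun (res : List String) (target : String) =>
          let t := target.toList
          if t.length = o.length then
            match bDiffs o t o.length 0 [] with
            | [] => res ++ [target]
            | [i, j] =>
                if o.getD i ' ' = t.getD j ' ' ∧ o.getD j ' ' = t.getD i ' ' then res ++ [target]
                else res
            | _ => res
          else res) := by
    funext res target
    exact body_eq o res target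
  rw [hfun]

-- ===== VERDICT (by name: the statement is the Claim_ definition above) =====
theorem findSimilarRestaunt_spec : Claim_equal_findSimilarRestaunt := by
  intro orignal targets _hdom
  unfold Spec_findSimilarRestaunt findSimilarRestaunt findSimilarRestaunt_alt
  by_cases hg : orignal.toList = [] ∨ targets = []
  · have hg' : orignal.toList = [] ∨ targets = [] ∨ targets.length = 0 := by tauto
    simp only [hg, hg', if_true]
  · have hg' : ¬ (orignal.toList = [] ∨ targets = [] ∨ targets.length = 0) := by
      rcases not_or.mp hg with ⟨h1, h2⟩
      simp [h1, h2, List.length_eq_zero_iff]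
    simp only [hg, hg', if_false]
    exact fold_eq orignal.toList targets []
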